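-- pv_equiv track=rewrite | github.com/Daylily-Informatics/marvain | archive/layers/shared/python/agent_core/planner.py | build_relationship_summary
-- ===== SOURCE A (Python) =====
-- from typing import Any, Dict, List, Optional, Tuple
--
-- def build_relationship_summary(memories: List[Dict[str, Any]]) -> str:
--     """Build a summary of relationship with a speaker from their memories.
--
--     Args:
--         memories: List of memories associated with the speaker
--
--     Returns:
--         A brief summary string
--     """
--     if not memories:
--         return "No prior relationship established."
--
--     facts = [m for m in memories if m.get("kind") == "FACT"]
--     preferences = [m for m in memories if m.get("kind") == "PREFERENCE"]
--     insights = [m for m in memories if m.get("kind") == "AI_INSIGHT"]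
--
--     summary_parts = []
--
--     # Add key facts
--     if facts:
--         fact_texts = [f["text"] for f in facts[:3]]
--         summary_parts.append(f"Known facts: {'; '.join(fact_texts)}")
--
--     # Add preferences
--     if preferences:
--         pref_texts = [p["text"] for p in preferences[:2]]
--         summary_parts.append(f"Preferences: {'; '.join(pref_texts)}")
--
--     # Add insights
--     if insights:
--         insight_texts = [i["text"] for i in insights[:2]]
--         summary_parts.append(f"Observations: {'; '.join(insight_texts)}")
--
--     return " | ".join(summary_parts) if summary_parts else "Limited information available."
-- ===== SOURCE B (Python) =====
-- def build_relationship_summary(memories):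
--     """Build a summary of relationship with a speaker from their memories."""
--     if not memories:
--         return "No prior relationship established."
--
--     groups = {}
--     for m in memories:
--         groups.setdefault(m.get("kind"), []).append(m)
--
--     summary_parts = []
--     for kind, limit, label in (("FACT", 3, "Known facts"),
--                                ("PREFERENCE", 2, "Preferences"),
--                                ("AI_INSIGHT", 2, "Observations")):
--         group = groups.get(kind, [])
--         if group:
--             summary_parts.append(f"{label}: {'; '.join(x['text'] for x in group[:limit])}")
--
--     return " | ".join(summary_parts) if summary_parts else "Limited information available."
-- ===== Notes on version B (the rewrite author's own statement) =====
-- stated objective: simpler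
-- what changed: One pass grouping memories by kind into a dict, then a single table-driven loop over (kind, limit, label) rows replaces the three separate filter passes and three copy-pasted if-blocks.
import Mathlib
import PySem

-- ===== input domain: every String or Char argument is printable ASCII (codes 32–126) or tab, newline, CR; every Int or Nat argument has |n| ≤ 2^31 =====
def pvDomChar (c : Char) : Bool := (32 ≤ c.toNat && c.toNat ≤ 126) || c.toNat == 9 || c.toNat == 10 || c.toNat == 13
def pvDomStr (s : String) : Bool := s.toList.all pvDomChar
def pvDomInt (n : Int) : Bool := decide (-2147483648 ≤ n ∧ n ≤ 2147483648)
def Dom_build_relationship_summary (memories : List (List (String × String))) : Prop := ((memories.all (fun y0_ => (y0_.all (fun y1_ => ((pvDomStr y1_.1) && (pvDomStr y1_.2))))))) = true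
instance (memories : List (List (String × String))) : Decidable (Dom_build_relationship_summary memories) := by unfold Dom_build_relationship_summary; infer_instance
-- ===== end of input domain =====

-- B replaces A's three filter passes and three copy-pasted if-blocks by one grouping pass
-- over the memories plus a table-driven emission loop (objective: simpler).

-- ===== PORT A =====
-- Literal port of A: three list-comprehension filters, then three sequential
-- conditional appends to summary_parts. m.get(k) is (Dict.ofList m).get? k,
-- m["text"] is modelled by getD with "" (Pre_ excludes the KeyError inputs),
-- facts[:3] is PySem.List.slice _ none (some 3).
def build_relationship_summary (memories : List (List (String × String))) : String :=
  if memories.isEmpty then "No prior relationship established." else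
  let facts := memories.filter (fun m => (PySem.Dict.ofList m).get? "kind" == some "FACT")
  let preferences := memories.filter (fun m => (PySem.Dict.ofList m).get? "kind" == some "PREFERENCE")
  let insights := memories.filter (fun m => (PySem.Dict.ofList m).get? "kind" == some "AI_INSIGHT")
  let summary_parts : List String := []
  let summary_parts := if !facts.isEmpty then
      summary_parts ++ ["Known facts: " ++ PySem.Str.join "; "
        ((PySem.List.slice facts none (some 3)).map (fun f => (PySem.Dict.ofList f).getD "text" ""))]
    else summary_parts
  let summary_parts := if !preferences.isEmpty then
      summary_parts ++ ["Preferences: " ++ PySem.Str.join "; "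
        ((PySem.List.slice preferences none (some 2)).map (fun p => (PySem.Dict.ofList p).getD "text" ""))]
    else summary_parts
  let summary_parts := if !insights.isEmpty then
      summary_parts ++ ["Observations: " ++ PySem.Str.join "; "
        ((PySem.List.slice insights none (some 2)).map (fun i => (PySem.Dict.ofList i).getD "text" ""))]
    else summary_parts
  if !summary_parts.isEmpty then PySem.Str.join " | " summary_parts
  else "Limited information available."

-- ===== PORT B =====
-- Literal port of Source B: groups.setdefault(k, []).append(m) is Dict.modify k [] (· ++ [m]);
-- the dict key is m.get("kind") : Option String; then one fold over the config table.
def build_relationship_summary_alt (memories : List (List (String × String))) : String :=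
  if memories.isEmpty then "No prior relationship established." else
  let groups : PySem.Dict (Option String) (List (List (String × String))) :=
    memories.foldl
      (fun d m => d.modify ((PySem.Dict.ofList m).get? "kind") [] (· ++ [m]))
      PySem.Dict.empty
  let summary_parts : List String :=
    [("FACT", (3 : Int), "Known facts"),
     ("PREFERENCE", (2 : Int), "Preferences"),
     ("AI_INSIGHT", (2 : Int), "Observations")].foldl
      (fun acc row =>
        let group := groups.getD (some row.1) []
        if !group.isEmpty then
          acc ++ [row.2.2 ++ ": " ++ PySem.Str.join "; "
            ((PySem.List.slice group none (some row.2.1)).map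
              (fun x => (PySem.Dict.ofList x).getD "text" ""))]
        else acc) []
  if !summary_parts.isEmpty then PySem.Str.join " | " summary_parts
  else "Limited information available."

-- ===== PRECONDITION & SPEC =====
-- Pre_ excludes exactly the inputs on which Python A raises KeyError: a memory of kind
-- FACT/PREFERENCE/AI_INSIGHT that falls within its kind's summarised prefix (3/2/2) but
-- has no "text" key.
def Pre_build_relationship_summary (memories : List (List (String × String))) : Prop :=
  (∀ m ∈ (memories.filter (fun m => (PySem.Dict.ofList m).get? "kind" == some "FACT")).take 3,
      ((PySem.Dict.ofList m).get? "text").isSome) ∧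
  (∀ m ∈ (memories.filter (fun m => (PySem.Dict.ofList m).get? "kind" == some "PREFERENCE")).take 2,
      ((PySem.Dict.ofList m).get? "text").isSome) ∧
  (∀ m ∈ (memories.filter (fun m => (PySem.Dict.ofList m).get? "kind" == some "AI_INSIGHT")).take 2,
      ((PySem.Dict.ofList m).get? "text").isSome)
instance (memories : List (List (String × String))) : Decidable (Pre_build_relationship_summary memories) := by unfold Pre_build_relationship_summary; infer_instance

def pvWitness_build_relationship_summary : (List (List (String × String))) :=
  [[("kind", "FACT"), ("text", "likes tea")], [("kind", "PREFERENCE"), ("text", "prefers email")]]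

def Spec_build_relationship_summary (memories : List (List (String × String))) (out : String) : Prop := out = build_relationship_summary_alt memories
instance (memories : List (List (String × String))) (out : String) : Decidable (Spec_build_relationship_summary memories out) := by unfold Spec_build_relationship_summary; infer_instance

-- ===== CLAIM (what is proved, stated in full; the proofs are below) =====
def Claim_equal_build_relationship_summary : Prop := ∀ (memories : List (List (String × String))), Dom_build_relationship_summary memories → Pre_build_relationship_summary memories → Spec_build_relationship_summary memories (build_relationship_summary memories)

-- ===== LEMMAS AND PROOFS =====

-- B's grouping dict looked up at kind k holds exactly A's filter of that kind, in order.
lemma brs_groups_getD (memories : List (List (String × String))) (k : Option String) :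
    (memories.foldl
      (fun d m => d.modify ((PySem.Dict.ofList m).get? "kind") [] (· ++ [m]))
      (PySem.Dict.empty : PySem.Dict (Option String) (List (List (String × String))))).getD k []
      = memories.filter (fun m => (PySem.Dict.ofList m).get? "kind" == k) := by
  have h := PySem.Dict.getD_foldl_modify_append
    (l := memories.map (fun m => ((PySem.Dict.ofList m).get? "kind", m)))
    (d := (PySem.Dict.empty : PySem.Dict (Option String) (List (List (String × String)))))
    (c := k)
  rw [List.foldl_map] at h
  rw [h]
  simp [List.filter_map, Function.comp_def]

theorem build_relationship_summary_spec : Claim_equal_build_relationship_summary := by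
  intro memories _ _
  unfold Spec_build_relationship_summary build_relationship_summary build_relationship_summary_alt
  by_cases hemp : memories.isEmpty
  · simp [hemp]
  · simp only [hemp, List.foldl, brs_groups_getD]
    rfl
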